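-- pv_equiv track=rewrite | github.com/glaucomori/Data_Science | Challenges/challenge03.py | calcula_senha
-- ===== SOURCE A (Python) =====
-- def calcula_senha(senha):
--     code = []
--     for i in senha:
--         countzero = i.count('0')
--         countone = i.count('1')
--         if countone < countzero:
--             code.append(0)
--         else:
--             code.append(1)
--     finalstring = str(code[0]) + str(code[1]) + str(code[2]) + str(code[3]) + str(code[4]) + str(code[5]) + str(code[6]) + str(code[7]) + str(code[8]) + str(code[9])
--     finalnumber = int(finalstring, base=2)
--     return finalnumber
-- ===== SOURCE B (Python) =====
-- def calcula_senha(senha):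
--     # Walk the ten positions from last to first, keeping a running bit weight,
--     # and decide each bit with a single balance scan over the string's chars.
--     total = 0
--     weight = 1
--     for idx in range(9, -1, -1):
--         balance = 0
--         for ch in senha[idx]:
--             if ch == '0':
--                 balance += 1
--             elif ch == '1':
--                 balance -= 1
--         if balance <= 0:
--             total += weight
--         weight *= 2
--     return total
-- ===== Notes on version B (the rewrite author's own statement) =====
-- stated objective: faster
-- what changed: B replaces A's build-a-bit-list-over-all-strings, two .count passes per string, digit-string concatenation and int(..,base=2) parse by a reversed-index loop over only the ten used positions that decides each bit with one balance scan ('0' adds 1, '1' subtracts 1) and accumulates the result as a running weighted sum (weight doubling each step).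
import Mathlib
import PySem

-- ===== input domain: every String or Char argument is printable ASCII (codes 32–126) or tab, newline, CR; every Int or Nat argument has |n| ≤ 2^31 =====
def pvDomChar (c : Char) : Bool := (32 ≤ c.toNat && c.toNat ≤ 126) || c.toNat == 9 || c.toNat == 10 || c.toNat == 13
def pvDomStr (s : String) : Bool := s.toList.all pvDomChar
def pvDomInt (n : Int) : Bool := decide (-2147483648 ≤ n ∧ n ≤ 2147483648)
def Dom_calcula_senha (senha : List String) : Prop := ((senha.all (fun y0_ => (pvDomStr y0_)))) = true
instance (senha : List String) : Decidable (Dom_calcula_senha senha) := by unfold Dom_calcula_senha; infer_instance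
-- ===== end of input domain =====

-- B replaces A's bit list over all strings, two .count passes per string, digit-string
-- concatenation and int(..,base=2) parse by a reversed-index loop over only the ten used
-- positions: one balance scan per string decides the bit, accumulated as a weighted sum.

-- ===== PORT A =====
-- str(code[k]) and the '+' chain on strings are ported over List Char (PySem.Int.toChars = str(n),
-- exact); int(finalstring, base=2) is PySem.Int.ofCharsBase? (none = ValueError, unreachable here:
-- the string is ten '0'/'1' digits); code[k] is pyGet? (none = IndexError, excluded by Pre_).
def calcula_senha (senha : List String) : Int :=
  let code : List Int := senha.foldl (fun acc i =>
    let countzero := PySem.Str.count i "0"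
    let countone := PySem.Str.count i "1"
    if countone < countzero then acc ++ [0] else acc ++ [1]) []
  let d : Int → List Char := fun k => PySem.Int.toChars ((PySem.List.pyGet? code k).getD 0)
  let finalstring : List Char :=
    d 0 ++ d 1 ++ d 2 ++ d 3 ++ d 4 ++ d 5 ++ d 6 ++ d 7 ++ d 8 ++ d 9
  (PySem.Int.ofCharsBase? finalstring 2).getD 0

-- ===== PORT B =====
-- senha[idx] is pyGet? (none = IndexError, excluded by Pre_); 'for ch in s' is a fold over
-- s.toList (exact on the ASCII domain).
def calcula_senha_alt (senha : List String) : Int :=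
  let st := (PySem.List.pyRange 9 (-1) (-1)).foldl (fun (st : Int × Int) idx =>
    let s := (PySem.List.pyGet? senha idx).getD ""
    let balance : Int := s.toList.foldl (fun b ch =>
      if ch = '0' then b + 1 else if ch = '1' then b - 1 else b) 0
    let total := if balance ≤ 0 then st.1 + st.2 else st.1
    (total, st.2 * 2)) ((0 : Int), (1 : Int))
  st.1

-- ===== PRECONDITION & SPEC =====
-- Pre_ excludes lists of fewer than 10 strings, on which A (code[9]) and B (senha[9]) raise IndexError.
def Pre_calcula_senha (senha : List String) : Prop := 10 ≤ senha.length
instance (senha : List String) : Decidable (Pre_calcula_senha senha) := by unfold Pre_calcula_senha; infer_instance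
def pvWitness_calcula_senha : List String := ["0", "1", "01", "10", "11", "00", "", "010", "101", "0110"]
def Spec_calcula_senha (senha : List String) (out : Int) : Prop := out = calcula_senha_alt senha
instance (senha : List String) (out : Int) : Decidable (Spec_calcula_senha senha out) := by unfold Spec_calcula_senha; infer_instance

-- ===== CLAIM (what is proved, stated in full; the proofs are below) =====
def Claim_equal_calcula_senha : Prop := ∀ (senha : List String), Dom_calcula_senha senha → Pre_calcula_senha senha → Spec_calcula_senha senha (calcula_senha senha)

-- ===== LEMMAS AND PROOFS =====

-- the majority bit of one string, and its Bool-indexed digit character list / value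
def pvBit (s : String) : Int :=
  if PySem.Str.count s "1" < PySem.Str.count s "0" then 0 else 1

def pvChr (b : Bool) : List Char := PySem.Int.toChars (if b then 0 else 1)
def pvVal (b : Bool) : Int := if b then 0 else 1

theorem pv_ite_decide {α : Type} (c : Prop) [Decidable c] (a b : α) :
    (if c then a else b) = (if decide c then a else b) := by
  by_cases h : c <;> simp [h]

theorem pvChr_bit (s : String) :
    PySem.Int.toChars (pvBit s) = pvChr (decide (PySem.Str.count s "1" < PySem.Str.count s "0")) :=
  congrArg PySem.Int.toChars (pv_ite_decide _ _ _)

theorem pvBit_val (s : String) :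
    pvVal (decide (PySem.Str.count s "1" < PySem.Str.count s "0")) = pvBit s := by
  unfold pvVal pvBit
  by_cases h : PySem.Str.count s "1" < PySem.Str.count s "0" <;> simp

-- kernel evaluation of the base-2 parser on all 1024 ten-digit strings of '0'/'1'
set_option maxHeartbeats 4000000 in
theorem pv_parse2_horner : ∀ b0 b1 b2 b3 b4 b5 b6 b7 b8 b9 : Bool,
    (PySem.Int.ofCharsBase?
      (pvChr b0 ++ pvChr b1 ++ pvChr b2 ++ pvChr b3 ++ pvChr b4 ++
       pvChr b5 ++ pvChr b6 ++ pvChr b7 ++ pvChr b8 ++ pvChr b9) 2).getD 0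
    = [pvVal b0, pvVal b1, pvVal b2, pvVal b3, pvVal b4,
       pvVal b5, pvVal b6, pvVal b7, pvVal b8, pvVal b9].foldl (fun n v => n * 2 + v) 0 := by
  decide

theorem pv_code_eq_map (senha : List String) :
    senha.foldl (fun acc i =>
      let countzero := PySem.Str.count i "0"
      let countone := PySem.Str.count i "1"
      if countone < countzero then acc ++ [(0 : Int)] else acc ++ [1]) []
    = senha.map pvBit := by
  have h : (fun (acc : List Int) (i : String) =>
      let countzero := PySem.Str.count i "0"
      let countone := PySem.Str.count i "1"
      if countone < countzero then acc ++ [(0 : Int)] else acc ++ [1])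
      = fun acc i => acc ++ [pvBit i] := by
    funext acc i
    simp only [pvBit]
    split <;> rfl
  rw [h, PySem.List.foldl_append_singleton_eq_map, List.nil_append]

theorem pvRangeDown : PySem.List.pyRange 9 (-1) (-1) = [9, 8, 7, 6, 5, 4, 3, 2, 1, 0] := by decide

theorem pvGetLit {α : Type} (x0 x1 x2 x3 x4 x5 x6 x7 x8 x9 : α) (rest : List α) :
    PySem.List.pyGet? (x0::x1::x2::x3::x4::x5::x6::x7::x8::x9::rest) 0 = some x0 ∧
    PySem.List.pyGet? (x0::x1::x2::x3::x4::x5::x6::x7::x8::x9::rest) 1 = some x1 ∧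
    PySem.List.pyGet? (x0::x1::x2::x3::x4::x5::x6::x7::x8::x9::rest) 2 = some x2 ∧
    PySem.List.pyGet? (x0::x1::x2::x3::x4::x5::x6::x7::x8::x9::rest) 3 = some x3 ∧
    PySem.List.pyGet? (x0::x1::x2::x3::x4::x5::x6::x7::x8::x9::rest) 4 = some x4 ∧
    PySem.List.pyGet? (x0::x1::x2::x3::x4::x5::x6::x7::x8::x9::rest) 5 = some x5 ∧
    PySem.List.pyGet? (x0::x1::x2::x3::x4::x5::x6::x7::x8::x9::rest) 6 = some x6 ∧
    PySem.List.pyGet? (x0::x1::x2::x3::x4::x5::x6::x7::x8::x9::rest) 7 = some x7 ∧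
    PySem.List.pyGet? (x0::x1::x2::x3::x4::x5::x6::x7::x8::x9::rest) 8 = some x8 ∧
    PySem.List.pyGet? (x0::x1::x2::x3::x4::x5::x6::x7::x8::x9::rest) 9 = some x9 := by
  refine ⟨?_, ?_, ?_, ?_, ?_, ?_, ?_, ?_, ?_, ?_⟩
  · rw [show (0:Int) = ((0:Nat):Int) from rfl, PySem.List.pyGet?_ofNat _ 0 (by simp)]; simp
  · rw [show (1:Int) = ((1:Nat):Int) from rfl, PySem.List.pyGet?_ofNat _ 1 (by simp)]; simp
  · rw [show (2:Int) = ((2:Nat):Int) from rfl, PySem.List.pyGet?_ofNat _ 2 (by simp)]; simp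
  · rw [show (3:Int) = ((3:Nat):Int) from rfl, PySem.List.pyGet?_ofNat _ 3 (by simp)]; simp
  · rw [show (4:Int) = ((4:Nat):Int) from rfl, PySem.List.pyGet?_ofNat _ 4 (by simp)]; simp
  · rw [show (5:Int) = ((5:Nat):Int) from rfl, PySem.List.pyGet?_ofNat _ 5 (by simp)]; simp
  · rw [show (6:Int) = ((6:Nat):Int) from rfl, PySem.List.pyGet?_ofNat _ 6 (by simp)]; simp
  · rw [show (7:Int) = ((7:Nat):Int) from rfl, PySem.List.pyGet?_ofNat _ 7 (by simp)]; simp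
  · rw [show (8:Int) = ((8:Nat):Int) from rfl, PySem.List.pyGet?_ofNat _ 8 (by simp)]; simp
  · rw [show (9:Int) = ((9:Nat):Int) from rfl, PySem.List.pyGet?_ofNat _ 9 (by simp)]; simp

-- Chars.count of a single-character pattern is List.count (by induction over count.go's fuel)
theorem pv_count_go_single (c : Char) : ∀ (s : List Char) (fuel acc : Nat), s.length ≤ fuel →
    PySem.Chars.count.go [c] fuel s acc = acc + s.count c := by
  intro s
  induction s with
  | nil => intro fuel acc h; cases fuel <;> simp [PySem.Chars.count.go]
  | cons h t ih =>
    intro fuel acc hf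
    cases fuel with
    | zero => simp at hf
    | succ n =>
      rw [PySem.Chars.count.go]
      simp only [List.isPrefixOf, List.length_cons] at *
      by_cases hc : h = c
      · simp [hc, ih n (acc + 1) (by omega)]
        omega
      · have hbe : (c == h) = false := by
          simp; exact fun e => hc e.symm
        simp [hbe, ih n acc (by omega), hc]

theorem pv_count_single (c : Char) (s : List Char) : PySem.Chars.count s [c] = s.count c := by
  simp [PySem.Chars.count, pv_count_go_single c s s.length 0 le_rfl]

-- the balance scan computes count('0') - count('1')
theorem pv_balance (l : List Char) : ∀ b : Int,
    l.foldl (fun b ch => if ch = '0' then b + 1 else if ch = '1' then b - 1 else b) b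
      = b + (l.count '0' : Int) - (l.count '1' : Int) := by
  induction l with
  | nil => intro b; simp
  | cons h t ih =>
    intro b
    by_cases h0 : h = '0'
    · simp [h0, ih]; ring
    · by_cases h1 : h = '1'
      · simp [h1, ih]; ring
      · simp [h0, h1, ih]

-- one step of B's loop, written through the majority bit
theorem pv_step (s : String) (t w : Int) :
    (if s.toList.foldl (fun (b : Int) ch => if ch = '0' then b + 1 else if ch = '1' then b - 1 else b) 0 ≤ 0
       then t + w else t) = t + pvBit s * w := by
  rw [pv_balance]
  unfold pvBit
  simp only [PySem.Str.count_eq, show ("0" : String).toList = ['0'] from rfl,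
             show ("1" : String).toList = ['1'] from rfl, pv_count_single]
  split_ifs with hb hc hc
  · omega
  · ring
  · omega
  · omega

-- ===== VERDICT (by name: the statement is the Claim_ definition above) =====
set_option maxHeartbeats 1000000 in
theorem calcula_senha_spec : Claim_equal_calcula_senha := by
  intro senha hdom hpre
  unfold Pre_calcula_senha at hpre
  rcases senha with _ | ⟨s0, _ | ⟨s1, _ | ⟨s2, _ | ⟨s3, _ | ⟨s4, _ | ⟨s5, _ | ⟨s6, _ | ⟨s7, _ | ⟨s8, _ | ⟨s9, rest⟩⟩⟩⟩⟩⟩⟩⟩⟩⟩ <;>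
    simp only [List.length_nil, List.length_cons] at hpre <;> try omega
  unfold Spec_calcula_senha calcula_senha calcula_senha_alt
  rw [pv_code_eq_map, pvRangeDown]
  simp only [List.map_cons, List.foldl_cons, List.foldl_nil]
  obtain ⟨h0, h1, h2, h3, h4, h5, h6, h7, h8, h9⟩ :=
    pvGetLit (pvBit s0) (pvBit s1) (pvBit s2) (pvBit s3) (pvBit s4)
      (pvBit s5) (pvBit s6) (pvBit s7) (pvBit s8) (pvBit s9) (List.map pvBit rest)
  obtain ⟨g0, g1, g2, g3, g4, g5, g6, g7, g8, g9⟩ := pvGetLit s0 s1 s2 s3 s4 s5 s6 s7 s8 s9 rest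
  simp only [h0, h1, h2, h3, h4, h5, h6, h7, h8, h9,
             g0, g1, g2, g3, g4, g5, g6, g7, g8, g9, Option.getD_some, pv_step]
  simp only [pvChr_bit]
  rw [pv_parse2_horner]
  simp only [List.foldl_cons, List.foldl_nil, pvBit_val]
  ring
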